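-- pv_equiv track=rewrite | github.com/chacham/learn-algorithm | algospot.com/POLY/solve.py | solve
-- ===== SOURCE A (Python) =====
-- MOD = 10000000
--
-- DP = [[-1] * 101 for _ in range(101)]
--
-- def solve(N):
--     def rec(count, side):
--         if DP[count][side] != -1:
--             return DP[count][side]
--         if count == side:
--             return 1
--
--         res = 0
--         restCount = count - side
--         for nextSide in range(1, restCount + 1):
--             res += rec(restCount, nextSide) * (side + nextSide - 1)
--         DP[count][side] = res % MOD
--         return DP[count][side]
--
--     res = 0
--     for side in range(1, N+1):
--         res += rec(N, side)
--     return res % MOD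
-- ===== SOURCE B (Python) =====
-- MOD = 10000000
--
-- def solve(N):
--     # Bottom-up over rest-sizes: rec(c, s) = ((s-1)*S0[c-s] + S1[c-s]) % MOD for s < c,
--     # where S0[m] = sum_s rec(m, s) and S1[m] = sum_s rec(m, s)*s, so each row is O(m).
--     if N < 1:
--         return 0
--     S0, S1 = [], []  # S0[m-1], S1[m-1] hold the sums for rest-size m
--     for m in range(1, N + 1):
--         s0, s1 = 1, m  # the s == m term contributes rec(m, m) = 1
--         for i, (a, b) in enumerate(zip(S0, S1)):
--             rest = i + 1
--             s = m - rest
--             v = ((s - 1) * a + b) % MOD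
--             s0 += v
--             s1 += v * s
--         S0.append(s0)
--         S1.append(s1)
--     return S0[N - 1] % MOD
-- ===== Notes on version B (the rewrite author's own statement) =====
-- stated objective: faster
-- what changed: Replaces A's memoized top-down O(N^3) recursion (inner loop over all next sides for every (count, side) pair) by a bottom-up O(N^2) pass that keeps per-rest-size sums S0=sum(rec) and S1=sum(rec*side), collapsing the inner sum to one O(1) formula rec(c,s)=((s-1)*S0[c-s]+S1[c-s])%MOD.
import Mathlib
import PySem

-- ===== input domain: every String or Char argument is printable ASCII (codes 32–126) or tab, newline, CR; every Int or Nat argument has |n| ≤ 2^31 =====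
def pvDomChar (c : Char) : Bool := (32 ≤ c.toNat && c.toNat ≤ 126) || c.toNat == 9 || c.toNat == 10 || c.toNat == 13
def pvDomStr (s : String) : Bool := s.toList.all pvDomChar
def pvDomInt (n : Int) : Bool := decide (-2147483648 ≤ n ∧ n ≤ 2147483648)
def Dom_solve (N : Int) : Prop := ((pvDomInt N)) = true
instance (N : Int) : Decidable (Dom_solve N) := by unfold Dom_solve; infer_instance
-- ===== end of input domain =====

-- B replaces A's memoized O(N^3) top-down recursion by an O(N^2) bottom-up pass using
-- per-row sums S0/S1 that collapse the inner sum to O(1); return values are identical.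
-- A's global memo table DP is modeled as a dictionary threaded through the call (the
-- cached values are the same on every call, so the returned value is unchanged).

-- ===== PORT A =====
def pvMOD : Int := 10000000

-- DP[count][side] reads/writes on the 101×101 memo array (kept in range by Pre_solve)
def dpGet (DP : List (List Int)) (c s : Int) : Int :=
  PySem.List.pyGetD (PySem.List.pyGetD DP c []) s (-1)

def dpSet (DP : List (List Int)) (c s : Int) (v : Int) : List (List Int) :=
  PySem.List.pySetD DP c (PySem.List.pySetD (PySem.List.pyGetD DP c []) s v)

-- rec(count, side) with the memo DP threaded as state; the fuel argument only bounds the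
-- recursion depth (depth ≤ count, so fuel = N+1 is never exhausted on admitted inputs).
def recA : Nat → Int → Int → List (List Int) → Int × List (List Int)
  | 0, _, _, DP => (0, DP)
  | fuel+1, count, side, DP =>
    if dpGet DP count side ≠ -1 then (dpGet DP count side, DP)
    else if count = side then (1, DP)
    else
      let restCount := count - side
      let st := (PySem.List.pyRange 1 (restCount + 1) 1).foldl
        (fun (st : Int × List (List Int)) nextSide =>
          let r := recA fuel restCount nextSide st.2
          (st.1 + r.1 * (side + nextSide - 1), r.2)) (0, DP)
      let DP2 := dpSet st.2 count side (PySem.Int.mod st.1 pvMOD)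
      (dpGet DP2 count side, DP2)

def solve (N : Int) : Int :=
  let st := (PySem.List.pyRange 1 (N + 1) 1).foldl
    (fun (st : Int × List (List Int)) side =>
      let r := recA (N.toNat + 1) N side st.2
      (st.1 + r.1, r.2)) (0, List.replicate 101 (List.replicate 101 (-1)))
  PySem.Int.mod st.1 pvMOD

-- ===== PORT B =====
def solve_alt (N : Int) : Int :=
  if N < 1 then 0
  else
    let st := (PySem.List.pyRange 1 (N + 1) 1).foldl
      (fun (st : List Int × List Int) m =>
        let p := (PySem.List.enumerate (st.1.zip st.2) 0).foldl
          (fun (p : Int × Int) x =>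
            let rest := x.1 + 1
            let s := m - rest
            let v := PySem.Int.mod ((s - 1) * x.2.1 + x.2.2) pvMOD
            (p.1 + v, p.2 + v * s)) (1, m)
        (st.1 ++ [p.1], st.2 ++ [p.2])) ([], [])
    PySem.Int.mod ((PySem.List.pyGet? st.1 (N - 1)).getD 0) pvMOD

-- ===== PRECONDITION & SPEC =====
-- Pre_solve excludes exactly the inputs N ≥ 101 on which A raises IndexError
-- (its memo table DP is a fixed 101×101 array).
def Pre_solve (N : Int) : Prop := N ≤ 100
instance (N : Int) : Decidable (Pre_solve N) := by unfold Pre_solve; infer_instance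
def pvWitness_solve : Int := 5

def Spec_solve (N : Int) (out : Int) : Prop := out = solve_alt N
instance (N : Int) (out : Int) : Decidable (Spec_solve N out) := by unfold Spec_solve; infer_instance

-- ===== CLAIM (what is proved, stated in full; the proofs are below) =====
def Claim_equal_solve : Prop := ∀ (N : Int), Dom_solve N → Pre_solve N → Spec_solve N (solve N)

-- ===== LEMMAS AND PROOFS =====

-- Pure value of Python's rec(count, side): gI c s, with gSum its inner loop's sum.
mutual
def gI (c s : Int) : Int :=
  if c = s then 1
  else if s < 1 ∨ c < s then 0
  else PySem.Int.mod (gSum (c - s) (c - s).toNat s) pvMOD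
termination_by (c.toNat, 0)
decreasing_by apply Prod.Lex.left; omega

def gSum (rc : Int) (n : Nat) (s : Int) : Int :=
  match n with
  | 0 => 0
  | n+1 => gSum rc n s + gI rc (n + 1) * (s + (n + 1) - 1)
termination_by (rc.toNat, n + 1)
decreasing_by all_goals (simp_wf; apply Prod.Lex.right; omega)
end

-- Row sums: T0 rc n = Σ_{k=1}^n gI rc k,  T1 rc n = Σ_{k=1}^n gI rc k * k.
def T0 (rc : Int) : Nat → Int
  | 0 => 0
  | n+1 => T0 rc n + gI rc (n + 1)

def T1 (rc : Int) : Nat → Int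
  | 0 => 0
  | n+1 => T1 rc n + gI rc (n + 1) * (n + 1)

theorem gSum_eq (rc s : Int) : ∀ n : Nat, gSum rc n s = (s - 1) * T0 rc n + T1 rc n := by
  intro n
  induction n with
  | zero => simp [gSum, T0, T1]
  | succ n ih => rw [gSum, T0, T1, ih]; ring

theorem gI_eq_of_lt (c s : Int) (h1 : 1 ≤ s) (h2 : s < c) :
    gI c s = PySem.Int.mod ((s - 1) * T0 (c - s) (c - s).toNat + T1 (c - s) (c - s).toNat) pvMOD := by
  rw [gI, if_neg (by omega), if_neg (by omega), gSum_eq]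

theorem gI_self (c : Int) : gI c c = 1 := by rw [gI]; simp

def A0 (r : Nat) : Int := T0 r r
def A1 (r : Nat) : Int := T1 r r

-- sums over range(1, n+1)
theorem sum_pyRange_gSum (rc s : Int) (n : Nat) :
    ((PySem.List.pyRange 1 ((n:Int)+1) 1).map (fun k => gI rc k * (s + k - 1))).sum = gSum rc n s := by
  induction n with
  | zero => simp [PySem.List.pyRange_one_eq_nil, gSum]
  | succ n ih =>
    have h : ((n:Int)+1+1) = ((n:Int)+1) + 1 := by ring
    rw [show (((n:Nat)+1 : Nat) : Int) = (n:Int)+1 by push_cast; ring, h,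
        PySem.List.pyRange_one_succ_right (by omega)]
    simp only [List.map_append, List.sum_append, ih, List.map_cons, List.map_nil,
      List.sum_cons, List.sum_nil, gSum]
    ring

theorem sum_pyRange_T0 (rc : Int) (n : Nat) :
    ((PySem.List.pyRange 1 ((n:Int)+1) 1).map (fun k => gI rc k)).sum = T0 rc n := by
  induction n with
  | zero => simp [PySem.List.pyRange_one_eq_nil, T0]
  | succ n ih =>
    have h : ((n:Int)+1+1) = ((n:Int)+1) + 1 := by ring
    rw [show (((n:Nat)+1 : Nat) : Int) = (n:Int)+1 by push_cast; ring, h,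
        PySem.List.pyRange_one_succ_right (by omega)]
    simp only [List.map_append, List.sum_append, ih, List.map_cons, List.map_nil,
      List.sum_cons, List.sum_nil, T0]
    ring

-- The memo invariant: well-shaped 101×101 table whose non-(-1) entries hold the pure value gI.
def InvD (DP : List (List Int)) : Prop :=
  DP.length = 101 ∧ (∀ row ∈ DP, row.length = 101) ∧
  ∀ c s : Int, 1 ≤ s → s ≤ c → c ≤ 100 → (dpGet DP c s = -1 ∨ dpGet DP c s = gI c s)

theorem pyGetD_const {α : Type} (xs : List α) (d : α) (h : ∀ y ∈ xs, y = d) (i : Int) :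
    PySem.List.pyGetD xs i d = d := by
  by_cases hin : PySem.Raise.InRange xs.length i
  · exact h _ (PySem.List.pyGetD_mem xs d hin)
  · rw [PySem.List.pyGetD_of_none xs i d ((PySem.List.pyGet?_eq_none_iff xs i).mpr hin)]

theorem dpGet_init (c s : Int) :
    dpGet (List.replicate 101 (List.replicate 101 (-1))) c s = -1 := by
  rw [dpGet]
  apply pyGetD_const
  intro y hy
  by_cases hin : PySem.Raise.InRange (List.replicate 101 (List.replicate 101 (-1)) : List (List Int)).length c
  · have hrow := PySem.List.pyGetD_mem (List.replicate 101 (List.replicate 101 (-1))) ([] : List Int) hin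
    rw [List.eq_of_mem_replicate hrow] at hy
    exact List.eq_of_mem_replicate hy
  · rw [PySem.List.pyGetD_of_none _ c ([] : List Int) ((PySem.List.pyGet?_eq_none_iff _ c).mpr hin)] at hy
    simp at hy

theorem dpGet_dpSet (DP : List (List Int)) (c s v : Int)
    (hlen : DP.length = 101) (hrow : ∀ row ∈ DP, row.length = 101)
    (hc : 0 ≤ c) (hc2 : c < 101) (hs : 0 ≤ s) (hs2 : s < 101)
    (c' s' : Int) (hc' : 0 ≤ c') (hs' : 0 ≤ s') :
    dpGet (dpSet DP c s v) c' s' = if c' = c ∧ s' = s then v else dpGet DP c' s' := by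
  have e1 : c = ((c.toNat : Nat) : Int) := by omega
  have e2 : s = ((s.toNat : Nat) : Int) := by omega
  have e3 : c' = ((c'.toNat : Nat) : Int) := by omega
  have e4 : s' = ((s'.toNat : Nat) : Int) := by omega
  have hcl : c.toNat < DP.length := by omega
  have hmemrow : PySem.List.pyGetD DP ((c.toNat : Nat) : Int) [] = DP[c.toNat] :=
    PySem.List.pyGetD_eq_getElem DP [] (by omega) (by omega)
  have hrl : s.toNat < (PySem.List.pyGetD DP ((c.toNat : Nat) : Int) []).length := by
    rw [hmemrow]
    have := hrow _ (DP.getElem_mem hcl)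
    omega
  rw [dpGet, dpSet, e1, e2, e3, e4]
  rw [PySem.List.pyGetD_pySetD_natCast _ _ _ _ _ hcl]
  by_cases hcc : c'.toNat = c.toNat
  · rw [if_pos hcc]
    rw [PySem.List.pyGetD_pySetD_natCast _ _ _ _ _ hrl]
    by_cases hss : s'.toNat = s.toNat
    · rw [if_pos hss, if_pos (show ((c'.toNat : Nat) : Int) = ((c.toNat : Nat) : Int)
          ∧ ((s'.toNat : Nat) : Int) = ((s.toNat : Nat) : Int) by omega)]
    · rw [if_neg hss, if_neg (show ¬(((c'.toNat : Nat) : Int) = ((c.toNat : Nat) : Int)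
          ∧ ((s'.toNat : Nat) : Int) = ((s.toNat : Nat) : Int)) by omega), dpGet,
          show ((c'.toNat : Nat) : Int) = ((c.toNat : Nat) : Int) by omega]
  · rw [if_neg hcc, if_neg (show ¬(((c'.toNat : Nat) : Int) = ((c.toNat : Nat) : Int)
          ∧ ((s'.toNat : Nat) : Int) = ((s.toNat : Nat) : Int)) by omega), dpGet]

theorem InvD_dpSet (DP : List (List Int)) (c s v : Int) (hinv : InvD DP)
    (h1 : 1 ≤ s) (h2 : s < c) (h3 : c ≤ 100) (hv : v = gI c s) :
    InvD (dpSet DP c s v) := by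
  obtain ⟨hlen, hrow, hval⟩ := hinv
  refine ⟨?_, ?_, ?_⟩
  · rw [dpSet, PySem.List.pySetD_of_nonneg _ _ (by omega : (0:Int) ≤ c)]
    simp [hlen]
  · intro row hmem
    rw [dpSet, PySem.List.pySetD_of_nonneg _ _ (by omega : (0:Int) ≤ c)] at hmem
    rcases List.mem_or_eq_of_mem_set hmem with h | h
    · exact hrow row h
    · subst h
      rw [PySem.List.pySetD_of_nonneg _ _ (by omega : (0:Int) ≤ s)]
      rw [List.length_set]
      have hcl : c.toNat < DP.length := by omega
      have : PySem.List.pyGetD DP c [] = DP[c.toNat] :=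
        PySem.List.pyGetD_eq_getElem DP [] (by omega) (by omega)
      rw [this]
      exact hrow _ (DP.getElem_mem hcl)
  · intro c' s' h1' h2' h3'
    rw [dpGet_dpSet DP c s v hlen hrow (by omega) (by omega) (by omega) (by omega) c' s' (by omega) (by omega)]
    by_cases hk : c' = c ∧ s' = s
    · rw [if_pos hk]; right; rw [hk.1, hk.2, hv]
    · rw [if_neg hk]; exact hval c' s' h1' h2' h3'

theorem recA_fold (fuel : Nat) (rc w : Int)
    (H : ∀ c s d, 1 ≤ s → s ≤ c → c ≤ 100 → c ≤ (fuel:Int) → InvD d →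
      (recA fuel c s d).1 = gI c s ∧ InvD (recA fuel c s d).2)
    (hrc : rc ≤ (fuel:Int)) (hrc100 : rc ≤ 100) :
    ∀ (l : List Int), (∀ k ∈ l, 1 ≤ k ∧ k ≤ rc) → ∀ (acc : Int) (d), InvD d →
      (l.foldl (fun st ns =>
          let r := recA fuel rc ns st.2
          (st.1 + r.1 * (w + ns - 1), r.2)) (acc, d)).1
        = acc + (l.map (fun k => gI rc k * (w + k - 1))).sum
      ∧ InvD (l.foldl (fun st ns =>
          let r := recA fuel rc ns st.2
          (st.1 + r.1 * (w + ns - 1), r.2)) (acc, d)).2 := by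
  intro l
  induction l with
  | nil => intro _ acc d hd; simpa using hd
  | cons k l ih =>
    intro hmem acc d hd
    have hk := hmem k (by simp)
    have hrec := H rc k d hk.1 hk.2 hrc100 hrc hd
    simp only [List.foldl_cons]
    obtain ⟨h1, h2⟩ := ih (fun x hx => hmem x (by simp [hx])) (acc + (recA fuel rc k d).1 * (w + k - 1)) (recA fuel rc k d).2 hrec.2
    refine ⟨?_, h2⟩
    rw [h1, hrec.1]
    simp; ring

theorem recA_spec : ∀ (fuel : Nat) (c s : Int) (d), 1 ≤ s → s ≤ c → c ≤ 100 → c ≤ (fuel:Int) → InvD d →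
    (recA fuel c s d).1 = gI c s ∧ InvD (recA fuel c s d).2 := by
  intro fuel
  induction fuel with
  | zero => intro c s d h1 h2 _ h3 _; exfalso; simp only [Nat.cast_zero] at h3; omega
  | succ fuel ih =>
    intro c s d h1 h2 h100 h3 hd
    simp only [recA]
    by_cases hmem : dpGet d c s ≠ -1
    · rw [if_pos hmem]
      rcases hd.2.2 c s h1 h2 h100 with h | h
      · exact absurd h hmem
      · exact ⟨h, hd⟩
    · rw [if_neg hmem]
      by_cases hcs : c = s
      · rw [if_pos hcs]; subst hcs; exact ⟨(gI_self c).symm, hd⟩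
      · rw [if_neg hcs]
        have hsc : s < c := lt_of_le_of_ne h2 (fun h => hcs h.symm)
        have hrcf : (c - s) ≤ (fuel : Int) := by push_cast at h3 ⊢; omega
        have hmem' : ∀ k ∈ PySem.List.pyRange 1 ((c - s) + 1) 1, 1 ≤ k ∧ k ≤ (c - s) := by
          intro k hk; rw [PySem.List.mem_pyRange_one] at hk; omega
        obtain ⟨hf1, hf2⟩ := recA_fold fuel (c - s) s ih hrcf (by omega) _ hmem' 0 d hd
        have hval : (((PySem.List.pyRange 1 ((c - s) + 1) 1).foldl
            (fun st ns =>
              let r := recA fuel (c - s) ns st.2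
              (st.1 + r.1 * (s + ns - 1), r.2)) (0, d))).1 = gSum (c - s) (c - s).toNat s := by
          rw [hf1]
          rw [show ((c - s) + 1 : Int) = (((c - s).toNat : Nat) : Int) + 1 by omega]
          rw [sum_pyRange_gSum]
          ring
        have hgI : gI c s = PySem.Int.mod (gSum (c - s) (c - s).toNat s) pvMOD := by
          rw [gI, if_neg hcs, if_neg (by omega)]
        have hget := dpGet_dpSet _ c s (PySem.Int.mod (((PySem.List.pyRange 1 ((c - s) + 1) 1).foldl
            (fun st ns =>
              let r := recA fuel (c - s) ns st.2
              (st.1 + r.1 * (s + ns - 1), r.2)) (0, d))).1 pvMOD)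
          hf2.1 hf2.2.1 (by omega) (by omega) (by omega) (by omega) c s (by omega) (by omega)
        constructor
        · rw [hget, if_pos ⟨rfl, rfl⟩, hval, hgI]
        · exact InvD_dpSet _ c s _ hf2 h1 hsc h100 (by rw [hval, hgI])

theorem recA_fold_plain (fuel : Nat) (rc : Int)
    (H : ∀ c s d, 1 ≤ s → s ≤ c → c ≤ 100 → c ≤ (fuel:Int) → InvD d →
      (recA fuel c s d).1 = gI c s ∧ InvD (recA fuel c s d).2)
    (hrc : rc ≤ (fuel:Int)) (hrc100 : rc ≤ 100) :
    ∀ (l : List Int), (∀ k ∈ l, 1 ≤ k ∧ k ≤ rc) → ∀ (acc : Int) (d), InvD d →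
      (l.foldl (fun st ns =>
          let r := recA fuel rc ns st.2
          (st.1 + r.1, r.2)) (acc, d)).1
        = acc + (l.map (fun k => gI rc k)).sum := by
  intro l
  induction l with
  | nil => intro _ acc d _; simp
  | cons k l ih =>
    intro hmem acc d hd
    have hk := hmem k (by simp)
    have hrec := H rc k d hk.1 hk.2 hrc100 hrc hd
    simp only [List.foldl_cons]
    rw [ih (fun x hx => hmem x (by simp [hx])) (acc + (recA fuel rc k d).1) (recA fuel rc k d).2 hrec.2, hrec.1]
    simp; ring

theorem solveA_eq (n : Nat) (hn100 : n ≤ 100) :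
    solve ((n : Int)) = PySem.Int.mod (T0 (n:Int) n) pvMOD := by
  rw [solve]
  have hE : InvD (List.replicate 101 (List.replicate 101 (-1))) := by
    refine ⟨by simp, ?_, ?_⟩
    · intro row hmem; rw [List.eq_of_mem_replicate hmem]; simp
    · intro c s _ _ _; left; exact dpGet_init c s
  have hmem' : ∀ k ∈ PySem.List.pyRange 1 ((n:Int) + 1) 1, 1 ≤ k ∧ k ≤ (n:Int) := by
    intro k hk; rw [PySem.List.mem_pyRange_one] at hk; omega
  have hfuel : ((n:Int)) ≤ (((n:Int).toNat + 1 : Nat) : Int) := by push_cast; omega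
  have h := recA_fold_plain ((n:Int).toNat + 1) (n:Int) (recA_spec _) hfuel (by omega) _ hmem' 0
    (List.replicate 101 (List.replicate 101 (-1))) hE
  simp only [h, sum_pyRange_T0, zero_add]

-- ==== B side ====

theorem enumerate_map_range {α : Type} (h : Nat → α) (j : Nat) :
    PySem.List.enumerate ((List.range j).map h) 0 = (List.range j).map (fun (i : Nat) => ((i : Int), h i)) := by
  induction j with
  | zero => simp [PySem.List.enumerate_nil]
  | succ j ih =>
    rw [List.range_succ, List.map_append, List.map_append, PySem.List.enumerate_append, ih]
    simp [PySem.List.enumerate_cons, PySem.List.enumerate_nil]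

theorem foldl_pair {α : Type} (f g : α → Int) :
    ∀ (l : List α) (a b : Int),
      (l.foldl (fun p x => (p.1 + f x, p.2 + g x)) (a, b)) = (a + (l.map f).sum, b + (l.map g).sum) := by
  intro l
  induction l with
  | nil => simp
  | cons x l ih => intro a b; simp [ih]; constructor <;> ring

theorem desc0 (m : Nat) (hm : 1 ≤ m) :
    ∀ j, j ≤ m - 1 → ((List.range j).map (fun (i : Nat) => gI (m:Int) ((m:Int) - ((i:Int)+1)))).sum
      = T0 (m:Int) (m-1) - T0 (m:Int) (m-1-j) := by
  intro j
  induction j with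
  | zero => intro _; simp
  | succ j ih =>
    intro hj
    rw [List.range_succ, List.map_append, List.sum_append, ih (by omega)]
    have hk : m - 1 - j = (m - 1 - (j+1)) + 1 := by omega
    rw [hk, T0]
    have hcast : ((m - 1 - (j + 1) : Nat) : Int) + 1 = (m:Int) - ((j:Int)+1) := by omega
    rw [hcast]
    simp only [List.map_cons, List.map_nil, List.sum_cons, List.sum_nil]
    ring

theorem desc1 (m : Nat) (hm : 1 ≤ m) :
    ∀ j, j ≤ m - 1 → ((List.range j).map (fun (i : Nat) =>
        gI (m:Int) ((m:Int) - ((i:Int)+1)) * ((m:Int) - ((i:Int)+1)))).sum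
      = T1 (m:Int) (m-1) - T1 (m:Int) (m-1-j) := by
  intro j
  induction j with
  | zero => intro _; simp
  | succ j ih =>
    intro hj
    rw [List.range_succ, List.map_append, List.sum_append, ih (by omega)]
    have hk : m - 1 - j = (m - 1 - (j+1)) + 1 := by omega
    rw [hk, T1]
    have hcast : ((m - 1 - (j + 1) : Nat) : Int) + 1 = (m:Int) - ((j:Int)+1) := by omega
    rw [hcast]
    simp only [List.map_cons, List.map_nil, List.sum_cons, List.sum_nil]
    ring

theorem row_inner (j : Nat) :
    ((PySem.List.enumerate ((((List.range j).map (fun i => A0 (i+1))).zip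
        ((List.range j).map (fun i => A1 (i+1))))) 0).foldl
      (fun (p : Int × Int) x =>
        let rest := x.1 + 1
        let s := ((j:Int)+1) - rest
        let v := PySem.Int.mod ((s - 1) * x.2.1 + x.2.2) pvMOD
        (p.1 + v, p.2 + v * s)) (1, (j:Int)+1))
    = (A0 (j+1), A1 (j+1)) := by
  rw [List.zip_map', enumerate_map_range]
  have hbody : (fun (p : Int × Int) (x : Int × (Int × Int)) =>
      let rest := x.1 + 1
      let s := ((j:Int)+1) - rest
      let v := PySem.Int.mod ((s - 1) * x.2.1 + x.2.2) pvMOD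
      (p.1 + v, p.2 + v * s))
    = (fun p x => (p.1 + (PySem.Int.mod (((((j:Int)+1) - (x.1 + 1)) - 1) * x.2.1 + x.2.2) pvMOD),
                   p.2 + (PySem.Int.mod (((((j:Int)+1) - (x.1 + 1)) - 1) * x.2.1 + x.2.2) pvMOD)
                     * (((j:Int)+1) - (x.1 + 1)))) := rfl
  rw [hbody, foldl_pair, List.map_map, List.map_map]
  have hval : ∀ i : Nat, i ∈ List.range j →
      PySem.Int.mod (((((j:Int)+1) - (((i:Int)) + 1)) - 1) * A0 (i+1) + A1 (i+1)) pvMOD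
        = gI ((j:Int)+1) (((j:Int)+1) - ((i:Int)+1)) := by
    intro i hi
    rw [List.mem_range] at hi
    rw [gI_eq_of_lt ((j:Int)+1) (((j:Int)+1) - ((i:Int)+1)) (by omega) (by omega)]
    have e1 : ((j:Int)+1) - (((j:Int)+1) - ((i:Int)+1)) = ((i:Int)+1) := by ring
    rw [e1]
    have e2 : (((i:Int)+1)).toNat = i + 1 := by omega
    rw [e2]
    have e3 : ((i:Int)+1) = (((i+1 : Nat)) : Int) := by push_cast; ring
    rw [e3]
    rfl
  have hmap1 : ((List.range j).map ((fun (x : Int × Int × Int) =>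
        PySem.Int.mod (((((j:Int)+1) - (x.1 + 1)) - 1) * x.2.1 + x.2.2) pvMOD) ∘
        (fun (i : Nat) => ((i : Int), A0 (i+1), A1 (i+1)))))
      = (List.range j).map (fun (i : Nat) => gI ((j:Int)+1) (((j:Int)+1) - ((i:Int)+1))) := by
    apply List.map_congr_left
    intro i hi
    exact hval i hi
  have hmap2 : ((List.range j).map ((fun (x : Int × Int × Int) =>
        PySem.Int.mod (((((j:Int)+1) - (x.1 + 1)) - 1) * x.2.1 + x.2.2) pvMOD
          * (((j:Int)+1) - (x.1 + 1))) ∘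
        (fun (i : Nat) => ((i : Int), A0 (i+1), A1 (i+1)))))
      = (List.range j).map (fun (i : Nat) => gI ((j:Int)+1) (((j:Int)+1) - ((i:Int)+1))
          * (((j:Int)+1) - ((i:Int)+1))) := by
    apply List.map_congr_left
    intro i hi
    simp only [Function.comp]
    rw [hval i hi]
  rw [hmap1, hmap2]
  have hm1 : ((j+1 : Nat) : Int) = ((j:Int)+1) := by push_cast; ring
  have hd0 := desc0 (j+1) (by omega) j (by omega)
  have hd1 := desc1 (j+1) (by omega) j (by omega)
  rw [hm1] at hd0 hd1
  simp only [Nat.add_sub_cancel, Nat.sub_self] at hd0 hd1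
  rw [hd0, hd1]
  have hA0 : A0 (j+1) = T0 ((j:Int)+1) j + 1 := by
    show T0 ((j+1:Nat):Int) (j+1) = _
    rw [hm1, T0]; rw [gI_self]
  have hA1 : A1 (j+1) = T1 ((j:Int)+1) j + ((j:Int)+1) := by
    show T1 ((j+1:Nat):Int) (j+1) = _
    rw [hm1, T1]; rw [gI_self]; ring
  rw [hA0, hA1]
  simp only [Prod.mk.injEq, T0, T1]
  constructor <;> ring

theorem B_outer (n : Nat) :
    ((PySem.List.pyRange 1 ((n:Int)+1) 1).foldl
      (fun (st : List Int × List Int) m =>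
        let p := (PySem.List.enumerate (st.1.zip st.2) 0).foldl
          (fun (p : Int × Int) x =>
            let rest := x.1 + 1
            let s := m - rest
            let v := PySem.Int.mod ((s - 1) * x.2.1 + x.2.2) pvMOD
            (p.1 + v, p.2 + v * s)) (1, m)
        (st.1 ++ [p.1], st.2 ++ [p.2])) ([], []))
    = ((List.range n).map (fun i => A0 (i+1)), (List.range n).map (fun i => A1 (i+1))) := by
  induction n with
  | zero =>
    rw [show ((0:Nat):Int)+1 = 1 by norm_num, PySem.List.pyRange_one_eq_nil (le_refl 1)]
    simp
  | succ n ih =>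
    rw [show (((n+1:Nat)):Int)+1 = ((n:Int)+1)+1 by push_cast; ring,
        PySem.List.pyRange_one_succ_right (by omega), List.foldl_append, ih]
    simp only [List.foldl_cons, List.foldl_nil]
    rw [row_inner n]
    rw [List.range_succ, List.map_append, List.map_append]
    simp

-- ===== VERDICT (by name: the statement is the Claim_ definition above) =====
theorem solve_spec : Claim_equal_solve := by
  intro N _ hPre
  unfold Spec_solve
  by_cases hN : N < 1
  · have h1 : (N + 1 : Int) ≤ 1 := by omega
    rw [solve, solve_alt, if_pos hN, PySem.List.pyRange_one_eq_nil h1]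
    simp [PySem.Int.mod]
  · have hn : N = ((N.toNat : Nat) : Int) := by omega
    have hn1 : 1 ≤ N.toNat := by omega
    have h100 : N.toNat ≤ 100 := by unfold Pre_solve at hPre; omega
    rw [hn, solveA_eq _ h100, solve_alt, if_neg (by omega), B_outer]
    dsimp only
    have hge : (0:Int) ≤ ((N.toNat : Nat) : Int) - 1 := by omega
    rw [PySem.List.pyGet?_of_nonneg _ hge]
    have ht : (((N.toNat : Nat) : Int) - 1).toNat = N.toNat - 1 := by omega
    rw [ht]
    rw [List.getElem?_map]
    rw [List.getElem?_range (by omega)]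
    have hidx : N.toNat - 1 + 1 = N.toNat := by omega
    simp only [Option.map_some, Option.getD_some, hidx]
    rfl
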